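-- pv_equiv track=rewrite | github.com/Dirty13itch/athanor | scripts/bootstrap_host_adapter.py | _normalize_csv_list
-- ===== SOURCE A (Python) =====
-- def _normalize_csv_list(values: list[str] | None) -> list[str]:
--     normalized: list[str] = []
--     for value in values or []:
--         for item in str(value).split(","):
--             candidate = item.strip()
--             if candidate:
--                 normalized.append(candidate)
--     return normalized
-- ===== SOURCE B (Python) =====
-- def _normalize_csv_list(values: list[str] | None) -> list[str]:
--     combined = ",".join(str(v) for v in (values or []))
--     stripped = [token.strip() for token in combined.split(",")]
--     return [candidate for candidate in stripped if candidate]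
-- ===== Notes on version B (the rewrite author's own statement) =====
-- stated objective: alternative
-- what changed: B first flattens all values into one comma-joined string and performs a single split(',') over it, replacing A's nested per-value split loop with one join + one split + one map/filter pass.
import Mathlib
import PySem

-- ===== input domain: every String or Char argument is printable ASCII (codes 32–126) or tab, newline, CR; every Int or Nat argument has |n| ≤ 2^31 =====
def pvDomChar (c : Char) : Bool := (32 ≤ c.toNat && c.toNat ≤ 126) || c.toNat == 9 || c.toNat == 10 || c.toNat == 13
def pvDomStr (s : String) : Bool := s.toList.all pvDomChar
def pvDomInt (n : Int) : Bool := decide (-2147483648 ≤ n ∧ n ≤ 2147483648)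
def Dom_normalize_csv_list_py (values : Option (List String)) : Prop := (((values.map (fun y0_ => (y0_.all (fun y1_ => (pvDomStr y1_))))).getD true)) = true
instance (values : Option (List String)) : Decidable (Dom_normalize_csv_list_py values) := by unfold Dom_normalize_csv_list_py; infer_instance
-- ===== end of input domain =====

-- B replaces A's nested per-value split loop by one ','-join of all values followed by a single split(',') pass (alternative decomposition, same cost).

-- ===== PORT A =====
-- literal transliteration of A: outer loop over `values or []`, inner loop over value.split(","),
-- strip each item and append the non-empty ones.  split(",") has a non-empty separator, so
-- PySem.Str.split? is always `some`; `.getD []` only unwraps it.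
def normalize_csv_list_py (values : Option (List String)) : List String :=
  (values.getD []).foldl
    (fun normalized value =>
      ((PySem.Str.split? value ",").getD []).foldl
        (fun acc item =>
          let candidate := PySem.Str.strip item
          if candidate != "" then acc ++ [candidate] else acc)
        normalized)
    []

-- ===== PORT B =====
-- literal transliteration of B: join everything with ',', split once, strip each token, keep non-empty.
def normalize_csv_list_py_alt (values : Option (List String)) : List String :=
  let combined := PySem.Str.join "," (values.getD [])
  let stripped := ((PySem.Str.split? combined ",").getD []).map PySem.Str.strip
  stripped.filter (fun candidate => candidate != "")

-- ===== PRECONDITION & SPEC =====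
def Spec_normalize_csv_list_py (values : Option (List String)) (out : List String) : Prop := out = normalize_csv_list_py_alt values
instance (values : Option (List String)) (out : List String) : Decidable (Spec_normalize_csv_list_py values out) := by unfold Spec_normalize_csv_list_py; infer_instance

-- ===== CLAIM (what is proved, stated in full; the proofs are below) =====
def Claim_equal_normalize_csv_list_py : Prop := ∀ (values : Option (List String)), Dom_normalize_csv_list_py values → Spec_normalize_csv_list_py values (normalize_csv_list_py values)

-- ===== LEMMAS AND PROOFS =====

-- a simple structural back-to-front characterisation of split-on-one-character
def spChar (c : Char) : List Char → List (List Char)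
  | [] => [[]]
  | x :: xs => if x = c then [] :: spChar c xs else (spChar c xs).modifyHead (x :: ·)

theorem spChar_ne_nil (c : Char) (l : List Char) : spChar c l ≠ [] := by
  induction l with
  | nil => simp [spChar]
  | cons x xs ih =>
    simp only [spChar]
    split
    · simp
    · obtain ⟨y, ys, hy⟩ := List.exists_cons_of_ne_nil ih
      simp [hy, List.modifyHead]

theorem splitOn_go_eq (c : Char) : ∀ (fuel : Nat) (l cur acc : _), l.length ≤ fuel →
    PySem.Chars.splitOn.go [c] fuel l cur acc
      = acc.reverse ++ (spChar c l).modifyHead (cur.reverse ++ ·) := by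
  intro fuel
  induction fuel with
  | zero =>
    intro l cur acc h
    have hl : l = [] := by cases l <;> simp_all
    subst hl
    simp [PySem.Chars.splitOn.go, spChar, List.modifyHead]
  | succ n ih =>
    intro l cur acc h
    cases l with
    | nil => simp [PySem.Chars.splitOn.go, spChar, List.modifyHead]
    | cons x rest =>
      rw [PySem.Chars.splitOn.go]
      by_cases hx : x = c
      · subst hx
        simp only [List.isPrefixOf, BEq.rfl, Bool.true_and, List.isPrefixOf_nil_left, if_true,
          List.length_cons, List.length_nil, List.drop_succ_cons, List.drop_zero]
        rw [ih rest [] (cur.reverse :: acc) (by simpa using h)]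
        obtain ⟨y, ys, hy⟩ := List.exists_cons_of_ne_nil (spChar_ne_nil x rest)
        simp [spChar, hy, List.modifyHead]
      · have hpre : [c].isPrefixOf (x :: rest) = false := by
          simp [List.isPrefixOf]
          exact fun hcx => hx hcx.symm
        simp only [hpre, Bool.false_eq_true, if_false]
        rw [ih rest (x :: cur) acc (by simpa using h)]
        obtain ⟨y, ys, hy⟩ := List.exists_cons_of_ne_nil (spChar_ne_nil c rest)
        simp [spChar, hx, hy, List.modifyHead]

theorem splitOn_eq_spChar (c : Char) (l : List Char) :
    PySem.Chars.splitOn l [c] = spChar c l := by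
  rw [PySem.Chars.splitOn, splitOn_go_eq c (l.length + 1) l [] [] (by omega)]
  obtain ⟨y, ys, hy⟩ := List.exists_cons_of_ne_nil (spChar_ne_nil c l)
  simp [hy, List.modifyHead]

theorem spChar_append (c : Char) (s t : List Char) :
    spChar c (s ++ c :: t) = spChar c s ++ spChar c t := by
  induction s with
  | nil => simp [spChar]
  | cons x s' ih =>
    by_cases hx : x = c
    · simp [spChar, hx, ih]
    · obtain ⟨y, ys, hy⟩ := List.exists_cons_of_ne_nil (spChar_ne_nil c s')
      simp [spChar, hx, ih, hy, List.modifyHead]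

theorem spChar_intercalate (c : Char) : ∀ (vs : List (List Char)) (v : List Char),
    spChar c ([c].intercalate (v :: vs)) = (v :: vs).flatMap (spChar c) := by
  intro vs
  induction vs with
  | nil => intro v; simp [List.intercalate, List.intersperse]
  | cons w ws ih =>
    intro v
    have hstep : [c].intercalate (v :: w :: ws) = v ++ c :: [c].intercalate (w :: ws) := by
      simp [List.intercalate, List.intersperse]
    rw [hstep, spChar_append, ih w]
    simp

-- the inner Python loop appends the stripped non-empty items (map + filter form)
theorem inner_loop_eq (parts : List String) (acc : List String) :
    parts.foldl
        (fun acc item =>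
          let candidate := PySem.Str.strip item
          if candidate != "" then acc ++ [candidate] else acc)
        acc
      = acc ++ ((parts.map PySem.Str.strip).filter (fun candidate => candidate != "")) := by
  induction parts generalizing acc with
  | nil => simp
  | cons p ps ih =>
    rw [List.foldl_cons, ih]
    by_cases hp : (PySem.Str.strip p != "") = true
    · simp [hp, List.filter_cons, List.append_assoc]
    · rw [Bool.not_eq_true] at hp
      simp [hp, List.filter_cons]

-- what one value contributes: split, strip, keep non-empty
def contrib (v : String) : List String :=
  (((PySem.Chars.splitOn v.toList [',']).map String.ofList).map PySem.Str.strip).filter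
    (fun candidate => candidate != "")

theorem portA_eq_flatMap (values : Option (List String)) :
    normalize_csv_list_py values = (values.getD []).flatMap contrib := by
  unfold normalize_csv_list_py
  induction values.getD [] using List.reverseRecOn with
  | nil => simp
  | append_singleton vs v ih =>
    rw [List.foldl_append, List.foldl_cons, List.foldl_nil, ih, List.flatMap_append]
    rw [inner_loop_eq]
    simp [contrib, PySem.Str.split?, PySem.Chars.split?]

theorem main_eq (values : Option (List String)) :
    normalize_csv_list_py values = normalize_csv_list_py_alt values := by
  rw [portA_eq_flatMap]
  unfold normalize_csv_list_py_alt
  have hsep : ("," : String).toList = [','] := by decide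
  simp only [PySem.Str.split?, PySem.Chars.split?, hsep, List.isEmpty_cons, Bool.false_eq_true,
    if_false, Option.map_some, Option.getD_some]
  cases hL : values.getD [] with
  | nil => decide
  | cons v vs =>
    rw [PySem.Str.toList_join, hsep]
    rw [show PySem.Chars.join [','] (List.map String.toList (v :: vs))
          = [','].intercalate (v.toList :: vs.map String.toList) from by
        simp [PySem.Chars.join]]
    rw [splitOn_eq_spChar, spChar_intercalate]
    rw [show (v.toList :: vs.map String.toList) = (v :: vs).map String.toList from by simp]
    rw [List.flatMap_map]
    simp only [List.map_flatMap, List.filter_flatMap]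
    apply List.flatMap_congr
    intro x hx
    simp [contrib, splitOn_eq_spChar, Function.comp]

-- ===== VERDICT (by name: the statement is the Claim_ definition above) =====
theorem normalize_csv_list_py_spec : Claim_equal_normalize_csv_list_py := by
  intro values _
  unfold Spec_normalize_csv_list_py
  exact main_eq values
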